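/- GENERATED by tools/from_farm_form.py from prooffarm-gif/accepted/DGifDecompressLine.5/Proof.lean (a worked proof of the farm's unit `DGifDecompressLine.5`,
   accepted by the verdict) — do not edit. -/
import Gif.Spec.Units.DGifDecompressLine_5
import Gif.Spec.Proved.DGifDecompressLine_5_Lemmas

open X86 X86.User Asan ProgX.Base ProgX.Base.Spec Gif.Spec

/-- Segment 5 of `DGifDecompressLine` (106CFBH … 106D06H and 106C63H … 106C87H; l.902-904): THE CLEAR LOOP
`for (j = 0; j <= LZ_MAX_CODE; j++) Prefix[j] = NO_SUCH_CODE`. From `Mid` at 106CFBH: `j = 0` (`dl5_enter`), then 4096 rounds of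
the checked store `Prefix[j] =` — each inside `Prefix[4096]` — (`dl5_loop`: induction on `4096 − j` over `dl5_round`), to `Mid`
at 106C87H: the stores went to `Prefix` and the stack below the body's stack pointer only, so `Body`, `Locals` and the measure of
the main loop are carried by `Body.carry`. -/
theorem Gif.Spec.Proved.DGifDecompressLine_5_ok : Gif.Spec.DGifDecompressLine_5.Statement := by
  intro Lay hLay μ hμ u₀ hcode h_store4 H rest frames F R n m e ret v hat
  -- 106CFBH, 106D01H (l.902): `j = 0`, to the head of the loop
  refine (Gif.Spec.DGifDecompressLine_5.dl5_enter hLay hμ hcode hat).trans ?_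
  intro w hw
  -- 106C7EH (l.902-904): the loop, measure `4096 − j`
  exact Gif.Spec.DGifDecompressLine_5.dl5_loop hLay hμ hcode h_store4 4096 0 w rfl hw
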